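-- pv_equiv track=rewrite | github.com/ravishkumar012/Employee-Management-System | ty.py | analysis1
-- ===== SOURCE A (Python) =====
-- def analysis1(data):
--     l1=[]
--     depart_list=["HR","Finance","Engineering","Sales","Marketing","Other"]
--     for e in depart_list:
--         count=0
--         for i in data:
--             if e==i:
--                 count+=1
--         l1.append(count)
--     return l1
-- ===== SOURCE B (Python) =====
-- def analysis1(data):
--     counts = {}
--     for i in data:
--         counts[i] = counts.get(i, 0) + 1
--     return [counts.get(e, 0) for e in ["HR", "Finance", "Engineering", "Sales", "Marketing", "Other"]]
-- ===== Notes on version B (the rewrite author's own statement) =====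
-- stated objective: simpler
-- what changed: Replaces six repeated scans of data (one per department) by a single frequency-dict pass over data followed by six constant-time lookups with default 0.
import Mathlib
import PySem

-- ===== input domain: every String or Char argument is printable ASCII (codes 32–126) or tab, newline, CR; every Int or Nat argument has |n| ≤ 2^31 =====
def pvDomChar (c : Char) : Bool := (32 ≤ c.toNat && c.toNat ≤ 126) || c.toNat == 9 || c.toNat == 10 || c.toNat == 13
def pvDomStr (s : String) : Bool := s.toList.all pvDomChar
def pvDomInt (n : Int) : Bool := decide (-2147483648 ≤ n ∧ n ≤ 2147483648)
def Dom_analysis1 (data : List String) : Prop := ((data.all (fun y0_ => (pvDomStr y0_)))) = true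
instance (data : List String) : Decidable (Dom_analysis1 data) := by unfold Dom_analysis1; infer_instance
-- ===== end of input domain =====

-- ===== PORT A =====
-- B replaces A's six scans by one frequency-dict pass plus six defaulted lookups (objective: simpler).
def analysis1 (data : List String) : List Int :=
  (["HR", "Finance", "Engineering", "Sales", "Marketing", "Other"]).foldl
    (fun l1 e =>
      let count := data.foldl (fun count i => if e == i then count + 1 else count) (0 : Int)
      l1 ++ [count]) []

-- ===== PORT B =====
def analysis1_alt (data : List String) : List Int :=
  let counts := data.foldl (fun d i => d.insert i (d.getD i 0 + 1)) (PySem.Dict.empty : PySem.Dict String Int)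
  (["HR", "Finance", "Engineering", "Sales", "Marketing", "Other"]).map (fun e => counts.getD e 0)

-- ===== PRECONDITION & SPEC =====
def Spec_analysis1 (data : List String) (out : List Int) : Prop := out = analysis1_alt data
instance (data : List String) (out : List Int) : Decidable (Spec_analysis1 data out) := by unfold Spec_analysis1; infer_instance

-- ===== CLAIM (what is proved, stated in full; the proofs are below) =====
def Claim_equal_analysis1 : Prop := ∀ (data : List String), Dom_analysis1 data → Spec_analysis1 data (analysis1 data)

-- ===== LEMMAS AND PROOFS =====

-- ===== VERDICT (by name: the statement is the Claim_ definition above) =====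
lemma inner_count (e : String) (data : List String) :
    data.foldl (fun count i => if e == i then count + 1 else count) (0 : Int) = data.count e := by
  suffices h : ∀ c : Int, data.foldl (fun count i => if e == i then count + 1 else count) c = c + data.count e by
    simpa using h 0
  induction data with
  | nil => simp
  | cons x xs ih =>
    intro c
    simp only [List.foldl, List.count_cons, ih]
    by_cases h : e = x
    · simp [h]; ring
    · have h' : ¬ (x = e) := fun hh => h hh.symm
      simp [h, h']

theorem analysis1_spec : Claim_equal_analysis1 := by
  intro data _
  unfold Spec_analysis1 analysis1 analysis1_alt
  simp only [List.foldl, List.map, inner_count,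
    PySem.Dict.getD_foldl_insert_add_one, PySem.Dict.getD_empty]
  simp
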